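-- pv_equiv track=rewrite | github.com/zalio/word-problem-solver-thesis | number_assigners/type9_num_assigner.py | fix_solution_numbers_order
-- ===== SOURCE A (Python) =====
-- def fix_solution_numbers_order(solution_line, first_symbol_to_look_for):
--     split_solution_line = solution_line.split(" and ")
--     all_possible_symbols = ["+", "-", "*", "/", "="]
--     all_possible_symbols.remove(first_symbol_to_look_for)
--     if len(split_solution_line) > 1:
--         for i in split_solution_line[0]:
--             if i == first_symbol_to_look_for:
--                 return split_solution_line[1] + " and " + split_solution_line[0]
--             elif i in all_possible_symbols:
--                 return solution_line
--     return solution_line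
-- ===== SOURCE B (Python) =====
-- def fix_solution_numbers_order(solution_line, first_symbol_to_look_for):
--     symbols = ["+", "-", "*", "/", "="]
--     symbols.remove(first_symbol_to_look_for)  # ValueError on a bad symbol, as in A
--     clauses = solution_line.split(" and ")
--     if len(clauses) < 2:
--         return solution_line
--     clause = clauses[0]
--     positions = [p for p in (clause.find(sym) for sym in ["+", "-", "*", "/", "="]) if p != -1]
--     if positions and clause[min(positions)] == first_symbol_to_look_for:
--         return clauses[1] + " and " + clauses[0]
--     return solution_line
-- ===== Notes on version B (the rewrite author's own statement) =====
-- stated objective: alternative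
-- what changed: A scans the first clause character by character with two early returns; B instead runs str.find once per operator symbol, collects the hit positions, takes their minimum, and checks whether the character at that earliest position is the looked-for symbol.
import Mathlib
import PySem

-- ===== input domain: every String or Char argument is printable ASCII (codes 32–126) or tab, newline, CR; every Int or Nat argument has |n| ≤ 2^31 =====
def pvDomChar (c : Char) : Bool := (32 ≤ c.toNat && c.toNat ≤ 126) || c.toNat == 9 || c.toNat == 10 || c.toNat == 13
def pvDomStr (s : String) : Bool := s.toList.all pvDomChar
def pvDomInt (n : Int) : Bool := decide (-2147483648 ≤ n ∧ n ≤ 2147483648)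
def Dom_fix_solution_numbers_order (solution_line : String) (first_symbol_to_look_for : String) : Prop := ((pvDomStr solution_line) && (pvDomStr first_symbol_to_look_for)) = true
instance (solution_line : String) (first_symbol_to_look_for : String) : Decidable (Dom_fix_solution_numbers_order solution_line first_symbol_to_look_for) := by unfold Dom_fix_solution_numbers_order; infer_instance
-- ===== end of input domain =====

-- B replaces A's char-by-char early-return scan of the first clause by per-symbol
-- str.find passes: it collects each operator's first position, takes the minimum,
-- and tests the character there (objective: alternative).


-- ===== PORT A =====
-- A's for-loop over split[0] with its two early returns
def pvLoopA (first : String) (others : List String) (swap orig : String) : List Char → String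
  | [] => orig
  | c :: rest =>
    if String.ofList [c] = first then swap
    else if String.ofList [c] ∈ others then orig
    else pvLoopA first others swap orig rest

def fix_solution_numbers_order (solution_line : String) (first_symbol_to_look_for : String) : String :=
  let split_solution_line := PySem.Str.split? solution_line " and "
  match PySem.List.remove? ["+", "-", "*", "/", "="] first_symbol_to_look_for with
  | none => solution_line   -- ValueError in Python; outside Pre_
  | some all_possible_symbols =>
    match split_solution_line with
    | some (s0 :: s1 :: _) =>
      pvLoopA first_symbol_to_look_for all_possible_symbols
        (s1 ++ " and " ++ s0) solution_line s0.toList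
    | _ => solution_line

-- ===== PORT B =====
def fix_solution_numbers_order_alt (solution_line : String) (first_symbol_to_look_for : String) : String :=
  if PySem.List.remove? ["+", "-", "*", "/", "="] first_symbol_to_look_for = none then
    solution_line   -- ValueError in Python; outside Pre_
  else
    let clauses := (PySem.Str.split? solution_line " and ").getD []
    if clauses.length < 2 then solution_line
    else
      let clause := clauses.getD 0 ""
      let positions :=
        ((["+", "-", "*", "/", "="] : List String).map
          (fun sym => PySem.Str.find clause sym)).filter (fun p => p != -1)
      match PySem.List.min? positions (fun p => p) with
      | none => solution_line
      | some p =>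
        if (PySem.Str.pyGet? clause p).any (fun c => String.ofList [c] == first_symbol_to_look_for) then
          clauses.getD 1 "" ++ " and " ++ clause
        else solution_line

-- ===== PRECONDITION & SPEC =====
-- Pre_ excludes exactly the inputs where Python A raises ValueError
-- (first_symbol_to_look_for not one of the five operator strings); B raises there too.
def Pre_fix_solution_numbers_order (solution_line : String) (first_symbol_to_look_for : String) : Prop :=
  first_symbol_to_look_for ∈ (["+", "-", "*", "/", "="] : List String)
instance (solution_line : String) (first_symbol_to_look_for : String) : Decidable (Pre_fix_solution_numbers_order solution_line first_symbol_to_look_for) := by unfold Pre_fix_solution_numbers_order; infer_instance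

def pvWitness_fix_solution_numbers_order : String × String := ("x = 1 + 2 and y = 3", "=")

def Spec_fix_solution_numbers_order (solution_line : String) (first_symbol_to_look_for : String) (out : String) : Prop := out = fix_solution_numbers_order_alt solution_line first_symbol_to_look_for
instance (solution_line : String) (first_symbol_to_look_for : String) (out : String) : Decidable (Spec_fix_solution_numbers_order solution_line first_symbol_to_look_for out) := by unfold Spec_fix_solution_numbers_order; infer_instance

-- ===== CLAIM (what is proved, stated in full; the proofs are below) =====
def Claim_equal_fix_solution_numbers_order : Prop := ∀ (solution_line : String) (first_symbol_to_look_for : String), Dom_fix_solution_numbers_order solution_line first_symbol_to_look_for → Pre_fix_solution_numbers_order solution_line first_symbol_to_look_for → Spec_fix_solution_numbers_order solution_line first_symbol_to_look_for (fix_solution_numbers_order solution_line first_symbol_to_look_for)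

-- ===== LEMMAS AND PROOFS =====

-- the five operator characters, and the five operator strings
def pvOpChars : List Char := ['+', '-', '*', '/', '=']
def pvOpStrs : List String := ["+", "-", "*", "/", "="]

lemma pvOfListEq (c d : Char) : String.ofList [c] = String.ofList [d] ↔ c = d := by
  constructor
  · intro h
    have := congrArg String.toList h
    simpa using this
  · rintro rfl; rfl

lemma pvMemStrs_iff (c : Char) : String.ofList [c] ∈ pvOpStrs ↔ c ∈ pvOpChars := by
  unfold pvOpStrs pvOpChars
  have h : ∀ d : Char, (String.ofList [c] = String.ofList [d]) ↔ c = d := pvOfListEq c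
  simp only [List.mem_cons, List.not_mem_nil, or_false,
    show ("+" : String) = String.ofList ['+'] from rfl,
    show ("-" : String) = String.ofList ['-'] from rfl,
    show ("*" : String) = String.ofList ['*'] from rfl,
    show ("/" : String) = String.ofList ['/'] from rfl,
    show ("=" : String) = String.ofList ['='] from rfl, h]

lemma pvSingletonPrefix (x : Char) (l : List Char) : [x] <+: l ↔ l[0]? = some x := by
  cases l with
  | nil => simp
  | cons a t => simp [List.cons_prefix_cons, eq_comm]

lemma pvPrefixDrop (x : Char) (l : List Char) (i : Nat) :
    [x] <+: l.drop i ↔ l[i]? = some x := by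
  rw [pvSingletonPrefix, ← List.head?_eq_getElem?, List.head?_drop]

lemma pvFindNotMem (cs : List Char) (x : Char) (h : x ∉ cs) :
    PySem.Chars.find cs [x] = -1 :=
  (PySem.Chars.find_eq_neg_one_iff cs [x]).2 (by simpa [List.singleton_infix_iff] using h)

lemma pvFindMem (cs : List Char) (x : Char) (h : x ∈ cs) :
    ∃ n : Nat, PySem.Chars.find cs [x] = (n : Int) ∧ cs[n]? = some x ∧
      ∀ i < n, cs[i]? ≠ some x := by
  have h0 : 0 ≤ PySem.Chars.find cs [x] :=
    (PySem.Chars.find_nonneg_iff cs [x]).2 (List.singleton_infix_iff x cs |>.2 h)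
  obtain ⟨h1, h2⟩ := PySem.Chars.find_spec h0
  refine ⟨(PySem.Chars.find cs [x]).toNat, (Int.toNat_of_nonneg h0).symm, ?_, ?_⟩
  · exact (pvPrefixDrop x cs _).1 h1
  · intro i hi hcontra
    exact h2 i hi ((pvPrefixDrop x cs i).2 hcontra)

-- head of the filtered list = element at the first index satisfying p
lemma pvHeadFilter (p : Char → Bool) (l : List Char) (h : l.findIdx p < l.length) :
    (l.filter p).head? = some l[l.findIdx p] := by
  induction l with
  | nil => simp at h
  | cons a t ih =>
    by_cases hp : p a
    · simp [List.findIdx_cons, hp]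
    · have hfi : (a :: t).findIdx p = t.findIdx p + 1 := by simp [List.findIdx_cons, hp]
      have h' : t.findIdx p < t.length := by
        have := h; rw [hfi] at this; simpa using this
      rw [List.filter_cons_of_neg (by simpa using hp), ih h']
      congr 1
      simp [hfi]

-- A's "head of operator filter" equals B's "min over per-symbol find positions"
lemma pvFilterEqMin (cs : List Char) (first swap orig : String) :
    (if ((cs.filter (fun c => decide (String.ofList [c] ∈ pvOpStrs))).head?.any
        (fun c => String.ofList [c] == first)) then swap else orig)
    =
    (match PySem.List.min?
        ((pvOpStrs.map (fun sym => PySem.Chars.find cs sym.toList)).filter (fun p => p != -1))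
        (fun p => p) with
     | none => orig
     | some p =>
       if (PySem.List.pyGet? cs p).any (fun c => String.ofList [c] == first) then swap
       else orig) := by
  have hP : (fun c => decide (String.ofList [c] ∈ pvOpStrs)) =
      (fun c => decide (c ∈ pvOpChars)) := by
    funext c; simp [pvMemStrs_iff]
  rw [hP]
  by_cases hex : ∃ c ∈ cs, c ∈ pvOpChars
  · -- some operator occurs in cs
    have hn : cs.findIdx (fun c => decide (c ∈ pvOpChars)) < cs.length := by
      rw [List.findIdx_lt_length]
      obtain ⟨c, hc, hcop⟩ := hex
      exact ⟨c, hc, by simpa using hcop⟩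
    set n := cs.findIdx (fun c => decide (c ∈ pvOpChars)) with hn_def
    have hx : cs[n] ∈ pvOpChars := by
      have := List.findIdx_getElem (p := fun c => decide (c ∈ pvOpChars)) (xs := cs) (w := hn)
      simpa using this
    have hlow : ∀ i (hi : i < cs.length), i < n → cs[i] ∉ pvOpChars := by
      intro i hi hilt hcon
      have := List.not_of_lt_findIdx (p := fun c => decide (c ∈ pvOpChars)) (xs := cs) hilt
      simp at this
      exact this hcon
    -- find of any operator char that occurs lands at an index ≥ n, and find of cs[n] = n
    have hfind_ge : ∀ y : Char, y ∈ pvOpChars → ∀ m : Nat,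
        PySem.Chars.find cs [y] = (m : Int) → cs[m]? = some y → n ≤ m := by
      intro y hy m _ hget
      obtain ⟨hm, hgm⟩ := List.getElem?_eq_some_iff.1 hget
      by_contra hcon
      exact hlow m hm (by omega) (hgm ▸ hy)
    have hfind_x : PySem.Chars.find cs [cs[n]] = (n : Int) := by
      obtain ⟨m, hfm, hget, hmin⟩ := pvFindMem cs cs[n] (List.getElem_mem hn)
      have hmn : n ≤ m := hfind_ge cs[n] hx m hfm hget
      have hnm : m ≤ n := by
        by_contra hcon
        exact hmin n (by omega) (List.getElem?_eq_some_iff.2 ⟨hn, rfl⟩)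
      have : m = n := by omega
      rw [hfm, this]
    -- (n : Int) is a collected position
    have hmemn : (n : Int) ∈ (pvOpStrs.map
        (fun sym => PySem.Chars.find cs sym.toList)).filter (fun p => p != -1) := by
      refine List.mem_filter.2 ⟨?_, by simp⟩
      refine List.mem_map.2 ?_
      have hx' := hx
      unfold pvOpChars at hx'
      simp only [List.mem_cons, List.not_mem_nil, or_false] at hx'
      rcases hx' with h | h | h | h | h <;>
        [exact ⟨"+", by decide, by rw [show ("+" : String).toList = ['+'] from rfl, ← h]; exact hfind_x⟩;
         exact ⟨"-", by decide, by rw [show ("-" : String).toList = ['-'] from rfl, ← h]; exact hfind_x⟩;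
         exact ⟨"*", by decide, by rw [show ("*" : String).toList = ['*'] from rfl, ← h]; exact hfind_x⟩;
         exact ⟨"/", by decide, by rw [show ("/" : String).toList = ['/'] from rfl, ← h]; exact hfind_x⟩;
         exact ⟨"=", by decide, by rw [show ("=" : String).toList = ['='] from rfl, ← h]; exact hfind_x⟩]
    -- every collected position is ≥ n
    have hall : ∀ p ∈ (pvOpStrs.map
        (fun sym => PySem.Chars.find cs sym.toList)).filter (fun p => p != -1),
        (n : Int) ≤ p := by
      intro p hp
      obtain ⟨hpm, hpne⟩ := List.mem_filter.1 hp
      obtain ⟨sym, hsym, hfs⟩ := List.mem_map.1 hpm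
      have hpne' : p ≠ -1 := by simpa using hpne
      -- sym is one of the five one-char strings
      have hsym' : ∃ y : Char, y ∈ pvOpChars ∧ sym.toList = [y] := by
        unfold pvOpStrs at hsym
        simp only [List.mem_cons, List.not_mem_nil, or_false] at hsym
        rcases hsym with h | h | h | h | h <;> subst h
        · exact ⟨'+', by decide, rfl⟩
        · exact ⟨'-', by decide, rfl⟩
        · exact ⟨'*', by decide, rfl⟩
        · exact ⟨'/', by decide, rfl⟩
        · exact ⟨'=', by decide, rfl⟩
      obtain ⟨y, hy, hyl⟩ := hsym'
      rw [hyl] at hfs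
      have h0 : 0 ≤ PySem.Chars.find cs [y] := by
        rw [PySem.Chars.find_nonneg_iff]
        by_contra hinf
        exact hpne' (hfs ▸ (PySem.Chars.find_eq_neg_one_iff cs [y]).2 hinf)
      have hymem : y ∈ cs := by
        have := (PySem.Chars.find_nonneg_iff cs [y]).1 h0
        exact (List.singleton_infix_iff y cs).1 this
      obtain ⟨m, hfm, hget, _⟩ := pvFindMem cs y hymem
      have := hfind_ge y hy m hfm hget
      rw [← hfs, hfm]
      exact_mod_cast this
    -- hence the minimum is exactly n
    have hminq : PySem.List.min? ((pvOpStrs.map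
        (fun sym => PySem.Chars.find cs sym.toList)).filter (fun p => p != -1))
        (fun p => p) = some (n : Int) := by
      cases hmq : PySem.List.min? ((pvOpStrs.map
          (fun sym => PySem.Chars.find cs sym.toList)).filter (fun p => p != -1))
          (fun p => p) with
      | none =>
        have := (PySem.List.min?_eq_none_iff _ _).1 hmq
        rw [this] at hmemn
        simp at hmemn
      | some q =>
        have hq1 : (n : Int) ≤ q := hall q (PySem.List.min?_mem hmq)
        have hq2 : q ≤ (n : Int) := PySem.List.min?_isMin hmq _ hmemn
        rw [le_antisymm hq2 hq1]
    rw [hminq, pvHeadFilter _ _ hn]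
    simp only [PySem.List.pyGet?_natCast, List.getElem?_eq_getElem hn]
    rfl
  · -- no operator occurs in cs
    rw [not_exists] at hex
    have hex' : ∀ c ∈ cs, c ∉ pvOpChars := fun c hc hop => hex c ⟨hc, hop⟩
    have hfilter : cs.filter (fun c => decide (c ∈ pvOpChars)) = [] :=
      List.filter_eq_nil_iff.2 (fun c hc => by simpa using hex' c hc)
    have hfind : ∀ y : Char, y ∈ pvOpChars → PySem.Chars.find cs [y] = -1 := by
      intro y hy
      exact pvFindNotMem cs y (fun hm => hex' y hm hy)
    have hpos : (pvOpStrs.map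
        (fun sym => PySem.Chars.find cs sym.toList)).filter (fun p => p != -1) = [] := by
      rw [show pvOpStrs.map (fun sym => PySem.Chars.find cs sym.toList) =
        [PySem.Chars.find cs ['+'], PySem.Chars.find cs ['-'], PySem.Chars.find cs ['*'],
         PySem.Chars.find cs ['/'], PySem.Chars.find cs ['=']] from rfl]
      rw [hfind '+' (by decide), hfind '-' (by decide), hfind '*' (by decide),
        hfind '/' (by decide), hfind '=' (by decide)]
      rfl
    rw [hfilter, hpos]
    have : PySem.List.min? ([] : List Int) (fun p => p) = none :=
      (PySem.List.min?_eq_none_iff _ _).2 rfl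
    rw [this]
    simp

-- A's scan agrees with "filter, then look at the head".
lemma pvLoopA_eq_filter (first : String) (others : List String) (swap orig : String)
    (hmem : ∀ c : Char, String.ofList [c] ∈ pvOpStrs ↔
      (String.ofList [c] = first ∨ String.ofList [c] ∈ others))
    (cs : List Char) :
    pvLoopA first others swap orig cs =
      (if ((cs.filter (fun c => decide (String.ofList [c] ∈ pvOpStrs))).head?.any
          (fun c => String.ofList [c] == first)) then swap else orig) := by
  induction cs with
  | nil => rfl
  | cons c rest ih =>
    by_cases h1 : String.ofList [c] = first
    · have hp : (decide (String.ofList [c] ∈ pvOpStrs) = true) := by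
        simpa using (hmem c).2 (Or.inl h1)
      simp only [pvLoopA, if_pos h1, List.filter_cons, hp, if_true, List.head?_cons]
      simp [h1]
    · by_cases h2 : String.ofList [c] ∈ others
      · have hp : (decide (String.ofList [c] ∈ pvOpStrs) = true) := by
          simpa using (hmem c).2 (Or.inr h2)
        simp only [pvLoopA, if_neg h1, if_pos h2, List.filter_cons, hp, if_true, List.head?_cons]
        simp [h1]
      · have h3 : String.ofList [c] ∉ pvOpStrs := by
          intro h; rcases (hmem c).1 h with h' | h' <;> [exact h1 h'; exact h2 h']
        have hp : (decide (String.ofList [c] ∈ pvOpStrs) = false) := by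
          simpa using h3
        simp only [pvLoopA, if_neg h1, if_neg h2, List.filter_cons, hp, Bool.false_eq_true,
          if_false]
        exact ih

-- bridge: both ports, for a given successful remove? result, compute the same string
lemma pvKey (s first : String) (others : List String)
    (hrm : PySem.List.remove? pvOpStrs first = some others)
    (hmem : ∀ c : Char, String.ofList [c] ∈ pvOpStrs ↔
      (String.ofList [c] = first ∨ String.ofList [c] ∈ others)) :
    fix_solution_numbers_order s first = fix_solution_numbers_order_alt s first := by
  unfold fix_solution_numbers_order fix_solution_numbers_order_alt
  rw [show (["+", "-", "*", "/", "="] : List String) = pvOpStrs from rfl, hrm,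
    if_neg (by simp)]
  cases hs : PySem.Str.split? s " and " with
  | none => rfl
  | some l =>
    cases l with
    | nil => rfl
    | cons s0 tl =>
      cases tl with
      | nil => rfl
      | cons s1 tl =>
        rw [if_neg (by simp)]
        simp only [Option.getD_some, List.getD_cons_zero, List.getD_cons_succ,
          PySem.Str.find_eq, PySem.Str.pyGet?_eq]
        rw [pvLoopA_eq_filter first others _ _ hmem s0.toList,
          pvFilterEqMin s0.toList first (s1 ++ " and " ++ s0) s]
        rfl

-- ===== VERDICT (by name: the statement is the Claim_ definition above) =====
theorem fix_solution_numbers_order_spec : Claim_equal_fix_solution_numbers_order := by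
  intro s first _ hpre
  unfold Spec_fix_solution_numbers_order
  unfold Pre_fix_solution_numbers_order at hpre
  fin_cases hpre
  · exact pvKey s "+" ["-", "*", "/", "="] (by decide) (by intro c; unfold pvOpStrs; simp only [List.mem_cons, List.not_mem_nil, or_false]; try tauto)
  · exact pvKey s "-" ["+", "*", "/", "="] (by decide) (by intro c; unfold pvOpStrs; simp only [List.mem_cons, List.not_mem_nil, or_false]; try tauto)
  · exact pvKey s "*" ["+", "-", "/", "="] (by decide) (by intro c; unfold pvOpStrs; simp only [List.mem_cons, List.not_mem_nil, or_false]; try tauto)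
  · exact pvKey s "/" ["+", "-", "*", "="] (by decide) (by intro c; unfold pvOpStrs; simp only [List.mem_cons, List.not_mem_nil, or_false]; try tauto)
  · exact pvKey s "=" ["+", "-", "*", "/"] (by decide) (by intro c; unfold pvOpStrs; simp only [List.mem_cons, List.not_mem_nil, or_false]; try tauto)
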